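-- pv_equiv track=rewrite | github.com/rodmur/hackerrank | supercomputer.py | findcross
-- ===== SOURCE A (Python) =====
-- def findcross(n,m,c,grid,cross):
--     candidates = []
--     for k in range(c):
--         for i in range(n):
--             for j in range(m):
--                 ok = True
--                 for x,y in cross[k]:
--                     if 0 <= i+x < n and 0 <= j+y < m and grid[i+x][j+y] == 'G':
--                         pass
--                     else:
--                         ok = False
--                         break
--
--                 if ok:
--                     candidates.append((i,j,k))
--
--     return candidates
-- ===== SOURCE B (Python) =====
-- def findcross(n, m, c, grid, cross):
--     # Index the G cells once, then per template intersect the shifted G-sets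
--     # and scan positions by membership instead of re-testing every offset.
--     gset = {(r, cc)
--             for r, row in enumerate(grid) if r < n
--             for cc, cell in enumerate(row) if cc < m and cell == 'G'}
--     out = []
--     for k in range(c):
--         S = None
--         for x, y in cross[k]:
--             shifted = {(r - x, cc - y) for (r, cc) in gset
--                        if 0 <= r - x < n and 0 <= cc - y < m}
--             S = shifted if S is None else S & shifted
--         for i in range(n):
--             for j in range(m):
--                 if S is None or (i, j) in S:
--                     out.append((i, j, k))
--     return out
-- ===== Notes on version B (the rewrite author's own statement) =====
-- stated objective: alternative
-- what changed: B builds a set index of the G cells once and, per template, intersects the shifted G-sets over the offsets, then emits positions by a single membership scan, instead of A's per-position inner loop over all offsets.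
-- outside the precondition, e.g. on findcross(1, 1, 1, [], [[(5, 5)]]): A returns [], B returns []; on findcross(0, 8, 4, [[''], ['G']], []): A returns [], B raises IndexError
import Mathlib
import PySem

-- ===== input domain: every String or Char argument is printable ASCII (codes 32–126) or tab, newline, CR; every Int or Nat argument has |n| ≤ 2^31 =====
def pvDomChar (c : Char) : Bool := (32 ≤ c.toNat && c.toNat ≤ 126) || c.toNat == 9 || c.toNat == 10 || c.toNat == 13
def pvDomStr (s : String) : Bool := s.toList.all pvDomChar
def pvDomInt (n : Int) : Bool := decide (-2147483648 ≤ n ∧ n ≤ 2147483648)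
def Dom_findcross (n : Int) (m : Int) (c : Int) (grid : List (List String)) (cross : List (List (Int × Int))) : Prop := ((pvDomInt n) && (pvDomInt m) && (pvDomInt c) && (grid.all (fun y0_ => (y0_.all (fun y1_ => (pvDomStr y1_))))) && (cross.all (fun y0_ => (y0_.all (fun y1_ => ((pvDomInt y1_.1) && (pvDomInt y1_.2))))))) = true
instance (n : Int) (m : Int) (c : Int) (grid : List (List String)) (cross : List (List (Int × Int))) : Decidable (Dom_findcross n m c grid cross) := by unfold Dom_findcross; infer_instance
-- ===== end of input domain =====

-- B replaces A's per-position offset loop by one G-cell set index, per-template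
-- intersection of shifted G-sets and a membership scan (objective: alternative).

-- ===== PORT A =====
-- inner 'for x,y in cross[k]' loop with its break (returns A's 'ok' flag)
def checkA (n m : Int) (grid : List (List String)) (i j : Int) : List (Int × Int) → Bool
  | [] => true
  | (x, y) :: rest =>
    if 0 ≤ i + x ∧ i + x < n ∧ 0 ≤ j + y ∧ j + y < m ∧
        PySem.List.pyGetD (PySem.List.pyGetD grid (i + x) []) (j + y) "" = "G"
    then checkA n m grid i j rest
    else false

def findcross (n : Int) (m : Int) (c : Int) (grid : List (List String)) (cross : List (List (Int × Int))) : List (Int × Int × Int) :=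
  (PySem.List.pyRange 0 c 1).foldl (fun acc k =>
    (PySem.List.pyRange 0 n 1).foldl (fun acc i =>
      (PySem.List.pyRange 0 m 1).foldl (fun acc j =>
        if checkA n m grid i j (PySem.List.pyGetD cross k []) then acc ++ [(i, j, k)] else acc)
        acc) acc) []

-- ===== PORT B =====
-- gset = {(r,cc) for r,row in enumerate(grid) if r<n for cc,cell in enumerate(row) if cc<m and cell=='G'}
def bGset (n m : Int) (grid : List (List String)) : PySem.Set (Int × Int) :=
  PySem.Set.ofList ((PySem.List.enumerate grid 0).flatMap (fun p =>
    if p.1 < n then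
      (PySem.List.enumerate p.2 0).filterMap (fun q =>
        if q.1 < m ∧ q.2 = "G" then some (p.1, q.1) else none)
    else []))

-- shifted = {(r-x, cc-y) for (r,cc) in gset if 0<=r-x<n and 0<=cc-y<m}
def bShifted (n m : Int) (grid : List (List String)) (x y : Int) : PySem.Set (Int × Int) :=
  PySem.Set.ofList ((bGset n m grid).filterMap (fun rc =>
    if 0 ≤ rc.1 - x ∧ rc.1 - x < n ∧ 0 ≤ rc.2 - y ∧ rc.2 - y < m
    then some (rc.1 - x, rc.2 - y) else none))

-- the 'S = shifted if S is None else S & shifted' fold over cross[k]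
def bS (n m : Int) (grid : List (List String)) (offs : List (Int × Int)) : Option (PySem.Set (Int × Int)) :=
  offs.foldl (fun S xy =>
    match S with
    | none => some (bShifted n m grid xy.1 xy.2)
    | some s => some (PySem.Set.inter s (bShifted n m grid xy.1 xy.2))) none

-- 'S is None or (i,j) in S'
def bMem (S : Option (PySem.Set (Int × Int))) (p : Int × Int) : Bool :=
  match S with
  | none => true
  | some s => PySem.Set.contains s p

def findcross_alt (n : Int) (m : Int) (c : Int) (grid : List (List String)) (cross : List (List (Int × Int))) : List (Int × Int × Int) :=
  (PySem.List.pyRange 0 c 1).foldl (fun acc k =>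
    let S := bS n m grid (PySem.List.pyGetD cross k [])
    (PySem.List.pyRange 0 n 1).foldl (fun acc i =>
      (PySem.List.pyRange 0 m 1).foldl (fun acc j =>
        if bMem S (i, j) then acc ++ [(i, j, k)] else acc)
        acc) acc) []

-- ===== PRECONDITION & SPEC =====
-- A raises IndexError when c exceeds len(cross) or when a checked cell (i+x,j+y)
-- with 0<=i+x<n, 0<=j+y<m is missing from grid, so Pre_ requires c templates and,
-- whenever a cell can be probed at all (n,m > 0 and some used template nonempty),
-- an n×m grid.  This still excludes a few inputs on which A returns (a too-small
-- grid whose missing cells are shielded by an earlier failing offset of every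
-- template, or offsets that overshoot the grid everywhere): there A and B agree
-- anyway, the shape bound is just stated uniformly over the probed region; and
-- when n <= 0 or m <= 0 with c > len(cross), A never reaches cross[k] and
-- returns [] while B indexes cross[k] up front and raises, so Pre_ excludes it.
def Pre_findcross (n : Int) (m : Int) (c : Int) (grid : List (List String)) (cross : List (List (Int × Int))) : Prop :=
  (0 < c → c ≤ (cross.length : Int)) ∧
    ((0 < n ∧ 0 < m ∧ ∃ t ∈ cross.take c.toNat, t ≠ []) →
      n ≤ (grid.length : Int) ∧ ∀ row ∈ grid.take n.toNat, m ≤ (row.length : Int))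
instance (n : Int) (m : Int) (c : Int) (grid : List (List String)) (cross : List (List (Int × Int))) : Decidable (Pre_findcross n m c grid cross) := by unfold Pre_findcross; infer_instance

def pvWitness_findcross : Int × Int × Int × List (List String) × (List (List (Int × Int))) :=
  (2, 2, 1, [["G", "."], [".", "G"]], [[(0, 0)]])

def Spec_findcross (n : Int) (m : Int) (c : Int) (grid : List (List String)) (cross : List (List (Int × Int))) (out : List (Int × Int × Int)) : Prop := out = findcross_alt n m c grid cross
instance (n : Int) (m : Int) (c : Int) (grid : List (List String)) (cross : List (List (Int × Int))) (out : List (Int × Int × Int)) : Decidable (Spec_findcross n m c grid cross out) := by unfold Spec_findcross; infer_instance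

-- ===== CLAIM (what is proved, stated in full; the proofs are below) =====
def Claim_equal_findcross : Prop := ∀ (n : Int) (m : Int) (c : Int) (grid : List (List String)) (cross : List (List (Int × Int))), Dom_findcross n m c grid cross → Pre_findcross n m c grid cross → Spec_findcross n m c grid cross (findcross n m c grid cross)

-- ===== LEMMAS AND PROOFS =====

theorem mem_bGset {n m : Int} {grid : List (List String)}
    (hg : n ≤ (grid.length : Int))
    (hr : ∀ row ∈ grid.take n.toNat, m ≤ (row.length : Int)) (a b : Int) :
    (a, b) ∈ bGset n m grid ↔
      0 ≤ a ∧ a < n ∧ 0 ≤ b ∧ b < m ∧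
        PySem.List.pyGetD (PySem.List.pyGetD grid a []) b "" = "G" := by
  unfold bGset
  rw [PySem.Set.mem_ofList, List.mem_flatMap]
  constructor
  · rintro ⟨p, hp, hmem⟩
    rw [PySem.List.mem_enumerate_iff] at hp
    obtain ⟨r, hrlen, rfl⟩ := hp
    simp only [zero_add] at hmem
    split at hmem
    · rename_i hrn
      rw [List.mem_filterMap] at hmem
      obtain ⟨q, hq, hq2⟩ := hmem
      rw [PySem.List.mem_enumerate_iff] at hq
      obtain ⟨cc, hcclen, rfl⟩ := hq
      simp only [zero_add] at hq2
      split at hq2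
      · rename_i hcond
        cases hq2
        refine ⟨by omega, hrn, by omega, hcond.1, ?_⟩
        rw [PySem.List.pyGetD_natCast, PySem.List.pyGetD_natCast,
          List.getD_eq_getElem grid [] hrlen, List.getD_eq_getElem _ "" hcclen]
        exact hcond.2
      · exact absurd hq2 (by simp)
    · simp at hmem
  · rintro ⟨ha0, han, hb0, hbm, hcell⟩
    have halen : a.toNat < grid.length := by omega
    have hrow : grid[a.toNat] ∈ grid.take n.toNat := by
      rw [List.mem_take_iff_getElem]
      exact ⟨a.toNat, by omega, by simp⟩
    have hblen : b.toNat < grid[a.toNat].length := by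
      have := hr _ hrow; omega
    refine ⟨((a.toNat : Int), grid[a.toNat]), ?_, ?_⟩
    · rw [PySem.List.mem_enumerate_iff]
      exact ⟨a.toNat, halen, by simp⟩
    · have : ((a.toNat : Int)) < n := by omega
      simp only [this, if_pos, List.mem_filterMap]
      refine ⟨((b.toNat : Int), grid[a.toNat][b.toNat]), ?_, ?_⟩
      · rw [PySem.List.mem_enumerate_iff]
        exact ⟨b.toNat, hblen, by simp⟩
      · have hbm' : ((b.toNat : Int)) < m := by omega
        have ha' : a = ((a.toNat : Int)) := by omega
        have hb' : b = ((b.toNat : Int)) := by omega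
        rw [ha', hb', PySem.List.pyGetD_natCast, PySem.List.pyGetD_natCast,
          List.getD_eq_getElem grid [] halen, List.getD_eq_getElem _ "" hblen] at hcell
        simp only [hbm', hcell, and_self, if_pos]
        simp [ha'.symm, hb'.symm]

theorem mem_bShifted {n m : Int} {grid : List (List String)} {i j x y : Int}
    (hi0 : 0 ≤ i) (hin : i < n) (hj0 : 0 ≤ j) (hjm : j < m) :
    (i, j) ∈ bShifted n m grid x y ↔ (i + x, j + y) ∈ bGset n m grid := by
  unfold bShifted
  rw [PySem.Set.mem_ofList, List.mem_filterMap]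
  constructor
  · rintro ⟨⟨r, cc⟩, hrc, hif⟩
    by_cases hcnd : (0 ≤ r - x ∧ r - x < n ∧ 0 ≤ cc - y ∧ cc - y < m)
    · rw [if_pos hcnd, Option.some.injEq, Prod.mk.injEq] at hif
      obtain ⟨h1, h2⟩ := hif
      have heq : ((i + x : Int), (j + y : Int)) = (r, cc) := by
        rw [Prod.mk.injEq]; constructor <;> omega
      rw [heq]; exact hrc
    · rw [if_neg hcnd] at hif; cases hif
  · intro hmem
    refine ⟨(i + x, j + y), hmem, ?_⟩
    have h1 : i + x - x = i := by ring
    have h2 : j + y - y = j := by ring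
    simp only [h1, h2]
    simp [hi0, hin, hj0, hjm]

-- one offset's test in A equals membership in its shifted set
theorem cond_iff_mem {n m : Int} {grid : List (List String)} {i j x y : Int}
    (hg : n ≤ (grid.length : Int))
    (hr : ∀ row ∈ grid.take n.toNat, m ≤ (row.length : Int))
    (hi0 : 0 ≤ i) (hin : i < n) (hj0 : 0 ≤ j) (hjm : j < m) :
    ((0 ≤ i + x ∧ i + x < n ∧ 0 ≤ j + y ∧ j + y < m ∧
        PySem.List.pyGetD (PySem.List.pyGetD grid (i + x) []) (j + y) "" = "G") ↔
      (i, j) ∈ bShifted n m grid x y) := by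
  rw [mem_bShifted hi0 hin hj0 hjm, mem_bGset hg hr]

theorem bMem_foldl {n m : Int} {grid : List (List String)} {i j : Int}
    (hg : n ≤ (grid.length : Int))
    (hr : ∀ row ∈ grid.take n.toNat, m ≤ (row.length : Int))
    (hi0 : 0 ≤ i) (hin : i < n) (hj0 : 0 ≤ j) (hjm : j < m) :
    ∀ (offs : List (Int × Int)) (S0 : Option (PySem.Set (Int × Int))),
      bMem (offs.foldl (fun S xy =>
        match S with
        | none => some (bShifted n m grid xy.1 xy.2)
        | some s => some (PySem.Set.inter s (bShifted n m grid xy.1 xy.2))) S0) (i, j)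
      = (bMem S0 (i, j) && checkA n m grid i j offs) := by
  intro offs
  induction offs with
  | nil => intro S0; simp [checkA]
  | cons xy rest ih =>
    intro S0
    obtain ⟨x, y⟩ := xy
    rw [List.foldl_cons, ih, checkA]
    have hstep : bMem (match S0 with
        | none => some (bShifted n m grid x y)
        | some s => some (PySem.Set.inter s (bShifted n m grid x y))) (i, j)
        = (bMem S0 (i, j) && decide ((i, j) ∈ bShifted n m grid x y)) := by
      cases S0 with
      | none =>
        simp only [bMem, Bool.true_and]
        rw [Bool.eq_iff_iff]
        simp
      | some s =>
        simp only [bMem]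
        rw [Bool.eq_iff_iff]
        simp [PySem.Set.mem_inter]
    rw [hstep]
    by_cases hc : (0 ≤ i + x ∧ i + x < n ∧ 0 ≤ j + y ∧ j + y < m ∧
        PySem.List.pyGetD (PySem.List.pyGetD grid (i + x) []) (j + y) "" = "G")
    · have hm : (i, j) ∈ bShifted n m grid x y := (cond_iff_mem hg hr hi0 hin hj0 hjm).1 hc
      simp [hc, hm]
    · have hm : (i, j) ∉ bShifted n m grid x y :=
        fun h => hc ((cond_iff_mem hg hr hi0 hin hj0 hjm).2 h)
      simp [hc, hm]

-- ===== VERDICT (by name: the statement is the Claim_ definition above) =====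
theorem findcross_spec : Claim_equal_findcross := by
  intro n m c grid cross _ hpre
  obtain ⟨hc, hshape⟩ := hpre
  unfold Spec_findcross findcross findcross_alt
  apply PySem.List.foldl_congr_mem
  intro acc k hk
  rw [PySem.List.mem_pyRange_one] at hk
  apply PySem.List.foldl_congr_mem
  intro acc i hi
  apply PySem.List.foldl_congr_mem
  intro acc j hj
  rw [PySem.List.mem_pyRange_one] at hi hj
  by_cases hnil : PySem.List.pyGetD cross k [] = []
  · rw [hnil]
    simp [checkA, bS, bMem]
  · have hlen : k.toNat < cross.length := by
      have := hc (by omega); omega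
    have hkk : k = ((k.toNat : Int)) := by omega
    have hget : PySem.List.pyGetD cross k [] = cross[k.toNat] := by
      conv_lhs => rw [hkk]
      rw [PySem.List.pyGetD_natCast, List.getD_eq_getElem cross [] hlen]
    have hex : ∃ t ∈ cross.take c.toNat, t ≠ [] := by
      refine ⟨cross[k.toNat], ?_, by rw [← hget]; exact hnil⟩
      rw [List.mem_take_iff_getElem]
      exact ⟨k.toNat, by omega, rfl⟩
    obtain ⟨hg, hr⟩ := hshape ⟨by omega, by omega, hex⟩
    have hcheck : checkA n m grid i j (PySem.List.pyGetD cross k [])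
        = bMem (bS n m grid (PySem.List.pyGetD cross k [])) (i, j) := by
      unfold bS
      rw [bMem_foldl hg hr hi.1 hi.2 hj.1 hj.2]
      simp [bMem]
    rw [hcheck]
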